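-- pv_equiv track=rewrite | github.com/CrowbarInc/AI-DM-Ashen-Thrones- | game/scenario_spine_eval.py | _split_three_window_ranges
-- ===== SOURCE A (Python) =====
-- def _split_three_window_ranges(n: int) -> tuple[tuple[int, int], tuple[int, int], tuple[int, int]]:
--     if n <= 0:
--         return ((0, -1), (0, -1), (0, -1))
--     third = n // 3
--     rem = n % 3
--     sizes = [
--         third + (1 if rem > 0 else 0),
--         third + (1 if rem > 1 else 0),
--         third,
--     ]
--     ranges: list[tuple[int, int]] = []
--     lo = 0
--     for sz in sizes:
--         if sz <= 0:
--             ranges.append((lo, lo - 1))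
--             continue
--         hi = lo + sz - 1
--         ranges.append((lo, hi))
--         lo = hi + 1
--     return (ranges[0], ranges[1], ranges[2])
-- ===== SOURCE B (Python) =====
-- def _split_three_window_ranges(n: int) -> tuple[tuple[int, int], tuple[int, int], tuple[int, int]]:
--     if n <= 0:
--         return ((0, -1), (0, -1), (0, -1))
--     third, rem = divmod(n, 3)
--     def win(i):
--         lo = i * third + min(i, rem)
--         return (lo, lo + third + (1 if i < rem else 0) - 1)
--     return (win(0), win(1), win(2))
-- ===== Notes on version B (the rewrite author's own statement) =====
-- stated objective: simpler
-- what changed: Replaced the sizes list, running-lo accumulator loop and sz<=0 branch with a closed-form per-window formula lo = i*third + min(i,rem), hi = lo + size - 1.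
import Mathlib
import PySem

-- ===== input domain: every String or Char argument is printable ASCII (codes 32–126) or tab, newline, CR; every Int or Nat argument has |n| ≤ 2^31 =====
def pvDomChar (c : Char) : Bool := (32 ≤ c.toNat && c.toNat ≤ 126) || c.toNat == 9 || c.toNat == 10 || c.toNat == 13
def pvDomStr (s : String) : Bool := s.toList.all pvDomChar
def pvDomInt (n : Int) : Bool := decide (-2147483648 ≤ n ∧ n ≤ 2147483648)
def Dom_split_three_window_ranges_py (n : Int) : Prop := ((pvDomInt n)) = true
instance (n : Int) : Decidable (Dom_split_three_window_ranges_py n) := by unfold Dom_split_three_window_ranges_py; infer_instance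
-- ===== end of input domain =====

-- B replaces A's sizes list and running-lo loop by a closed-form per-window formula (objective: simpler).

-- ===== PORT A =====
-- Loop body of A: state is (ranges, lo); one iteration per size.
def pvStepA (st : List (Int × Int) × Int) (sz : Int) : List (Int × Int) × Int :=
  if sz ≤ 0 then (st.1 ++ [(st.2, st.2 - 1)], st.2)
  else (st.1 ++ [(st.2, st.2 + sz - 1)], st.2 + sz - 1 + 1)

def split_three_window_ranges_py (n : Int) : (Int × Int) × (Int × Int) × (Int × Int) :=
  if n ≤ 0 then ((0, -1), (0, -1), (0, -1))
  else
    let third := PySem.Int.floordiv n 3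
    let rem := PySem.Int.mod n 3
    let sizes := [third + (if rem > 0 then 1 else 0), third + (if rem > 1 then 1 else 0), third]
    let st := sizes.foldl pvStepA ([], 0)
    (PySem.List.pyGetD st.1 0 (0, 0), PySem.List.pyGetD st.1 1 (0, 0), PySem.List.pyGetD st.1 2 (0, 0))

-- ===== PORT B =====
def pvWin (third rem i : Int) : Int × Int :=
  let lo := i * third + min i rem
  (lo, lo + third + (if i < rem then 1 else 0) - 1)

def split_three_window_ranges_py_alt (n : Int) : (Int × Int) × (Int × Int) × (Int × Int) :=
  if n ≤ 0 then ((0, -1), (0, -1), (0, -1))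
  else
    let third := PySem.Int.floordiv n 3
    let rem := PySem.Int.mod n 3
    (pvWin third rem 0, pvWin third rem 1, pvWin third rem 2)

-- ===== PRECONDITION & SPEC =====
def Spec_split_three_window_ranges_py (n : Int) (out : (Int × Int) × (Int × Int) × (Int × Int)) : Prop := out = split_three_window_ranges_py_alt n
instance (n : Int) (out : (Int × Int) × (Int × Int) × (Int × Int)) : Decidable (Spec_split_three_window_ranges_py n out) := by unfold Spec_split_three_window_ranges_py; infer_instance

-- ===== CLAIM (what is proved, stated in full; the proofs are below) =====
def Claim_equal_split_three_window_ranges_py : Prop := ∀ (n : Int), Dom_split_three_window_ranges_py n → Spec_split_three_window_ranges_py n (split_three_window_ranges_py n)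

-- ===== LEMMAS AND PROOFS =====
theorem pvStepA_pos (st : List (Int × Int) × Int) (sz : Int) (h : 0 < sz) :
    pvStepA st sz = (st.1 ++ [(st.2, st.2 + sz - 1)], st.2 + sz) := by
  simp only [pvStepA, if_neg (by omega : ¬ sz ≤ 0)]
  rw [Prod.ext_iff]
  exact ⟨rfl, by omega⟩

-- ===== VERDICT (by name: the statement is the Claim_ definition above) =====
theorem split_three_window_ranges_py_spec : Claim_equal_split_three_window_ranges_py := by
  intro n _
  unfold Spec_split_three_window_ranges_py split_three_window_ranges_py split_three_window_ranges_py_alt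
  by_cases h : n ≤ 0
  · simp [h]
  · have h3 : (0:Int) < 3 := by norm_num
    rw [PySem.Int.floordiv_eq_ediv_of_pos h3, PySem.Int.mod_eq_emod_of_pos h3]
    simp only [h, if_false]
    have hq : 3 * (n / 3) + n % 3 = n := by omega
    have hr0 : 0 ≤ n % 3 := Int.emod_nonneg n (by norm_num)
    have hr3 : n % 3 < 3 := Int.emod_lt_of_pos n h3
    generalize hQ : n / 3 = q at *
    generalize hR : n % 3 = r at *
    have hq0 : 0 ≤ q := by omega
    have hr : r = 0 ∨ r = 1 ∨ r = 2 := by omega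
    rcases hr with hr | hr | hr <;> subst hr <;>
      rcases (by omega : q = 0 ∨ 1 ≤ q) with hq1 | hq1
    · omega
    all_goals first
      | (subst hq1
         norm_num [pvStepA, pvWin, PySem.List.pyGetD, PySem.List.pyIdx?, min_def]
         rfl)
      | (simp only [List.foldl]
         rw [pvStepA_pos _ _ (by omega), pvStepA_pos _ _ (by omega),
             pvStepA_pos _ _ (by omega)]
         norm_num [pvWin, PySem.List.pyGetD, PySem.List.pyIdx?, min_def, Prod.ext_iff,
           (show Int.toNat 2 = 2 from rfl), (show Int.toNat 1 = 1 from rfl),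
           (show Int.toNat 0 = 0 from rfl),
           List.getElem_cons_zero, List.getElem_cons_succ]
         omega)
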